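-- pv_equiv track=rewrite | github.com/kamal-buqaileh/ruby_agent | core/analyzer.py | _generate_class_name_variations
-- ===== SOURCE A (Python) =====
-- from typing import Dict, List, Optional
--
-- def _generate_class_name_variations(class_name: str, namespaces: List[str]) -> List[str]:
--     """
--     Generate all possible class name variations for a given class.
--
--     For a class like Api::V1::UsersController, this generates:
--     - Api::V1::UsersController (full path)
--     - V1::UsersController (without outer namespace)
--     - UsersController (just class name)
--     - ::UsersController (absolute root reference)
--
--     Args:
--         class_name: The class name.
--         namespaces: List of namespace names.
--
--     Returns:
--         List of all possible class name variations.
--     """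
--     variations: List[str] = []
--
--     # Full path and partial paths: Api::V1::UsersController, V1::UsersController, etc.
--     # Generate all suffixes of the namespace chain
--     for i in range(len(namespaces) + 1):
--         if i == len(namespaces):
--             # Just the class name (no namespaces)
--             variations.append(class_name)
--         else:
--             partial_path = "::".join([*namespaces[i:], class_name])
--             variations.append(partial_path)
--
--     # Absolute root reference: ::UsersController
--     variations.append(f"::{class_name}")
--
--     return variations
-- ===== SOURCE B (Python) =====
-- def _generate_class_name_variations(class_name, namespaces):
--     # Build variations innermost-first with an accumulator: each new variation
--     # reuses the previously built suffix instead of re-joining a slice.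
--     acc = [class_name]
--     current = class_name
--     for ns in reversed(namespaces):
--         current = ns + "::" + current
--         acc.append(current)
--     acc.reverse()
--     acc.append("::" + class_name)
--     return acc
-- ===== Notes on version B (the rewrite author's own statement) =====
-- stated objective: alternative
-- what changed: Instead of re-joining each namespace-suffix slice with '::'.join, B walks the namespaces back-to-front with an accumulator, extending the previously built suffix by one namespace per step, then reverses the list and appends the absolute-root form.
import Mathlib
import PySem

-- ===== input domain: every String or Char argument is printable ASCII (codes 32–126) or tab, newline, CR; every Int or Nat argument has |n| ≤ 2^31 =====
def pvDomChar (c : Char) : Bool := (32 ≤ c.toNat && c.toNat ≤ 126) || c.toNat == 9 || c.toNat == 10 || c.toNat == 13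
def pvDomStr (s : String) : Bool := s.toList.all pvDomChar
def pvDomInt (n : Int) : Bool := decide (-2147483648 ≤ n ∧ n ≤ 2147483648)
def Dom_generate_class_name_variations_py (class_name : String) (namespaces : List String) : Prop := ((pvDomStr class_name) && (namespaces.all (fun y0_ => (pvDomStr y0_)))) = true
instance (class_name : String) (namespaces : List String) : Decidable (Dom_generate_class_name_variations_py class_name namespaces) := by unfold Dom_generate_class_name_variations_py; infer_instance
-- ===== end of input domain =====

-- B builds each variation by extending the previously built suffix back-to-front with an
-- accumulator, instead of re-joining a namespace slice per variation (objective: alternative).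

-- ===== PORT A =====
def generate_class_name_variations_py (class_name : String) (namespaces : List String) : List String :=
  let variations : List String :=
    (PySem.List.pyRange 0 ((namespaces.length : Int) + 1) 1).foldl
      (fun variations i =>
        if i = (namespaces.length : Int) then
          variations ++ [class_name]
        else
          variations ++ [PySem.Str.join "::" (PySem.List.slice namespaces (some i) none ++ [class_name])])
      []
  variations ++ ["::" ++ class_name]

-- ===== PORT B =====
def generate_class_name_variations_py_alt (class_name : String) (namespaces : List String) : List String :=
  let p : List String × String :=
    namespaces.reverse.foldl
      (fun (s : List String × String) ns =>
        let current := ns ++ "::" ++ s.2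
        (s.1 ++ [current], current))
      ([class_name], class_name)
  p.1.reverse ++ ["::" ++ class_name]

-- ===== PRECONDITION & SPEC =====
def Spec_generate_class_name_variations_py (class_name : String) (namespaces : List String) (out : List String) : Prop := out = generate_class_name_variations_py_alt class_name namespaces
instance (class_name : String) (namespaces : List String) (out : List String) : Decidable (Spec_generate_class_name_variations_py class_name namespaces out) := by unfold Spec_generate_class_name_variations_py; infer_instance

-- ===== CLAIM (what is proved, stated in full; the proofs are below) =====
def Claim_equal_generate_class_name_variations_py : Prop := ∀ (class_name : String) (namespaces : List String), Dom_generate_class_name_variations_py class_name namespaces → Spec_generate_class_name_variations_py class_name namespaces (generate_class_name_variations_py class_name namespaces)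

-- ===== LEMMAS AND PROOFS =====

-- g cn l k = "::"-join of the k-th namespace suffix followed by the class name
def pvSuffixJoin (cn : String) (l : List String) (k : Nat) : String :=
  PySem.Str.join "::" (l.drop k ++ [cn])

theorem pvSuffixJoin_length (cn : String) (l : List String) :
    pvSuffixJoin cn l l.length = cn := by
  simp [pvSuffixJoin, PySem.Str.join, PySem.Chars.join, List.intercalate]

theorem pvSuffixJoin_cons_zero (cn x : String) (xs : List String) :
    pvSuffixJoin cn (x :: xs) 0 = x ++ "::" ++ pvSuffixJoin cn xs 0 := by
  unfold pvSuffixJoin PySem.Str.join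
  obtain ⟨y, rest, h⟩ : ∃ y rest, (xs ++ [cn]).map String.toList = y :: rest := by
    cases xs <;> simp
  simp only [List.drop_zero, List.cons_append, List.map_cons, h,
    PySem.Chars.join_cons_cons, String.ofList_append, String.ofList_toList]

theorem pvSuffixJoin_cons_succ (cn x : String) (xs : List String) (j : Nat) :
    pvSuffixJoin cn (x :: xs) (j + 1) = pvSuffixJoin cn xs j := rfl

theorem pvRevMapRange {α : Type} (f : Nat → α) (n : Nat) :
    ((List.range n).map (fun k => f (n - 1 - k))).reverse = (List.range n).map f := by
  apply List.ext_getElem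
  · simp
  · intro i h1 h2
    simp only [List.length_map, List.length_range] at h1 h2
    simp only [List.getElem_reverse, List.length_map, List.length_range, List.getElem_map,
      List.getElem_range]
    congr 1
    omega

theorem pvA_eq (cn : String) (l : List String) :
    generate_class_name_variations_py cn l =
      (List.range l.length).map (pvSuffixJoin cn l) ++ [cn, "::" ++ cn] := by
  unfold generate_class_name_variations_py
  dsimp only
  rw [PySem.List.pyRange_one_succ_right (Int.natCast_nonneg l.length), List.foldl_append,
    List.foldl_cons, List.foldl_nil, if_pos rfl,
    PySem.List.foldl_congr_mem _ _ (fun acc i => acc ++ [pvSuffixJoin cn l i.toNat]) _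
      (by
        intro acc x hx
        rw [PySem.List.mem_pyRange_one] at hx
        rw [if_neg (by omega), PySem.List.slice_from l hx.1]
        rfl),
    PySem.List.foldl_append_singleton_eq_map, PySem.List.pyRange_one, List.map_map]
  simp [pvSuffixJoin]

theorem pvB_fold (cn : String) (l : List String) :
    l.reverse.foldl
      (fun (s : List String × String) ns => (s.1 ++ [ns ++ "::" ++ s.2], ns ++ "::" ++ s.2))
      ([cn], cn) =
      ((List.range (l.length + 1)).map (fun k => pvSuffixJoin cn l (l.length - k)),
        pvSuffixJoin cn l 0) := by
  induction l with
  | nil => simp [pvSuffixJoin, PySem.Str.join, PySem.Chars.join, List.intercalate]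
  | cons x xs ih =>
    rw [List.reverse_cons, List.foldl_append, ih]
    simp only [List.foldl_cons, List.foldl_nil, List.length_cons]
    refine Prod.ext ?_ ?_
    · show _ ++ _ = _
      rw [List.range_succ (n := xs.length + 1), List.map_append]
      congr 1
      · apply List.map_congr_left
        intro k hk
        rw [List.mem_range] at hk
        have : xs.length + 1 - k = (xs.length - k) + 1 := by omega
        rw [this, pvSuffixJoin_cons_succ]
      · simp [pvSuffixJoin_cons_zero]
    · exact (pvSuffixJoin_cons_zero cn x xs).symm

theorem pvB_eq (cn : String) (l : List String) :
    generate_class_name_variations_py_alt cn l =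
      (List.range l.length).map (pvSuffixJoin cn l) ++ [cn, "::" ++ cn] := by
  unfold generate_class_name_variations_py_alt
  dsimp only
  rw [pvB_fold]
  have h : (fun k => pvSuffixJoin cn l (l.length - k)) =
      (fun k => pvSuffixJoin cn l ((l.length + 1) - 1 - k)) := by
    funext k; congr 1
  rw [h, pvRevMapRange (pvSuffixJoin cn l) (l.length + 1), List.range_succ, List.map_append]
  simp [pvSuffixJoin_length]

-- ===== VERDICT (by name: the statement is the Claim_ definition above) =====
theorem generate_class_name_variations_py_spec : Claim_equal_generate_class_name_variations_py := by
  intro cn l _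
  unfold Spec_generate_class_name_variations_py
  rw [pvA_eq, pvB_eq]
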